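-- pv_equiv track=rewrite | github.com/rishipr-ui/Lithub | Downloads/Rishi_Final-submission/Tasks/Rishi-Preetham-final/Programming/Python/chall2.py | find_city_code_length
-- ===== SOURCE A (Python) =====
-- import math
--
-- def find_city_code_length(phone_numbers):
--     minimum_length = min(len(num) for num in phone_numbers)
--     maximum_possible_length = math.floor(minimum_length / 2)
--
--     if any(len(num) != len(phone_numbers[0]) for num in phone_numbers):
--         return -1
--
--     for length in range(maximum_possible_length, 0, -1):
--         prefix = phone_numbers[0][:length]
--         if all(num.startswith(prefix) for num in phone_numbers):
--             return length
--
--     return -1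
-- ===== SOURCE B (Python) =====
-- def find_city_code_length(phone_numbers):
--     cap = min(len(num) for num in phone_numbers) // 2
--     if any(len(num) != len(phone_numbers[0]) for num in phone_numbers):
--         return -1
--     first = phone_numbers[0]
--     common = len(first)
--     for num in phone_numbers[1:]:
--         k = 0
--         while k < common and first[k] == num[k]:
--             k += 1
--         common = k
--     ans = min(common, cap)
--     return ans if ans > 0 else -1
-- ===== Notes on version B (the rewrite author's own statement) =====
-- stated objective: alternative
-- what changed: B computes the common-prefix length once in a single left-to-right pass (folding a running prefix length over the list) and caps it at half the length, instead of A's descending scan over every candidate prefix length re-checked against every number; it trades A's C-level startswith re-scans for one pure pass.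
import Mathlib
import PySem

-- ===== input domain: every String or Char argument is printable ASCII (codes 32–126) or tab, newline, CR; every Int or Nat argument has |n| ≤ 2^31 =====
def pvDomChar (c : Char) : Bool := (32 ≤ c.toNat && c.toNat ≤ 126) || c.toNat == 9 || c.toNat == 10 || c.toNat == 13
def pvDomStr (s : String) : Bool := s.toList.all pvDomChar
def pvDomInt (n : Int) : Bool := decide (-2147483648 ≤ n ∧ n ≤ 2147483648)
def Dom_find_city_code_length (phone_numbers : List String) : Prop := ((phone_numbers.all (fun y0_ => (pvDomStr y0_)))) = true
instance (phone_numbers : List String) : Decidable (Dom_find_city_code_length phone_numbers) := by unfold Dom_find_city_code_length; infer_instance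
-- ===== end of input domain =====

-- B replaces A's descending scan over all candidate prefix lengths (each re-checked against every
-- number) by one left-to-right pass maintaining the running common-prefix length, then caps it
-- at half the length; objective: alternative (a genuinely different single-pass algorithm).

-- ===== PORT A =====
def find_city_code_length (phone_numbers : List String) : Int :=
  -- min(...) raises ValueError on an empty list: excluded by Pre_; the getD 0 default is unreachable
  let minimum_length : Int :=
    (PySem.List.min? (phone_numbers.map (fun num => (PySem.Str.len num : Int))) (fun x => x)).getD 0
  let maximum_possible_length : Int := PySem.Int.floordiv minimum_length 2
  let first := phone_numbers[0]?.getD ""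
  if phone_numbers.any (fun num => PySem.Str.len num != PySem.Str.len first) then -1
  else
    match (PySem.List.pyRange maximum_possible_length 0 (-1)).find?
        (fun length => phone_numbers.all
          (fun num => PySem.Str.startswith num (PySem.Str.slice first none (some length)))) with
    | some l => l
    | none => -1

-- ===== PORT B =====
-- the inner while loop of Source B: while k < common and first[k] == num[k]: k += 1
-- (first[k]/num[k] are in range whenever the loop guard holds on the admitted inputs; getD is exact there)
def pvWalk (first num : List Char) (common k : Nat) : Nat :=
  if h : k < common ∧ first.getD k ' ' = num.getD k ' ' then pvWalk first num common (k + 1) else k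
termination_by common - k
decreasing_by omega

def find_city_code_length_alt (phone_numbers : List String) : Int :=
  let cap : Int := PySem.Int.floordiv
    ((PySem.List.min? (phone_numbers.map (fun num => (PySem.Str.len num : Int))) (fun x => x)).getD 0) 2
  let first := phone_numbers[0]?.getD ""
  if phone_numbers.any (fun num => PySem.Str.len num != PySem.Str.len first) then -1
  else
    let common := (phone_numbers.drop 1).foldl
      (fun common num => pvWalk first.toList num.toList common 0) first.toList.length
    let ans : Int := min (common : Int) cap
    if ans > 0 then ans else -1

-- ===== PRECONDITION & SPEC =====
-- Pre_ excludes only the empty list, on which A (and B) raise ValueError in min().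
def Pre_find_city_code_length (phone_numbers : List String) : Prop := phone_numbers ≠ []
instance (phone_numbers : List String) : Decidable (Pre_find_city_code_length phone_numbers) := by
  unfold Pre_find_city_code_length; infer_instance
def pvWitness_find_city_code_length : List String := ["0401234", "0405678"]

def Spec_find_city_code_length (phone_numbers : List String) (out : Int) : Prop :=
  out = find_city_code_length_alt phone_numbers
instance (phone_numbers : List String) (out : Int) : Decidable (Spec_find_city_code_length phone_numbers out) := by
  unfold Spec_find_city_code_length; infer_instance

-- ===== CLAIM (what is proved, stated in full; the proofs are below) =====
def Claim_equal_find_city_code_length : Prop := ∀ (phone_numbers : List String),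
  Dom_find_city_code_length phone_numbers → Pre_find_city_code_length phone_numbers →
  Spec_find_city_code_length phone_numbers (find_city_code_length phone_numbers)

-- ===== LEMMAS AND PROOFS =====

/-- Length of the longest common prefix of two character lists. -/
def lcpLen : List Char → List Char → Nat
  | a :: as, b :: bs => if a = b then lcpLen as bs + 1 else 0
  | _, _ => 0

theorem lcpLen_self (f : List Char) : lcpLen f f = f.length := by
  induction f with
  | nil => rfl
  | cons a as ih => simp [lcpLen, ih]

theorem pvWalk_spec (f m : List Char) (common : Nat) (hf : common ≤ f.length) (hm : common ≤ m.length) :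
    ∀ k, k ≤ common → pvWalk f m common k = min common (k + lcpLen (f.drop k) (m.drop k)) := by
  intro k hk
  induction hd : common - k generalizing k with
  | zero =>
    have hkc : k = common := by omega
    rw [pvWalk]
    simp [hkc]
  | succ d ih =>
    have hlt : k < common := by omega
    have hkf : k < f.length := by omega
    have hkm : k < m.length := by omega
    rw [pvWalk]
    rw [List.drop_eq_getElem_cons hkf, List.drop_eq_getElem_cons hkm]
    by_cases heq : f[k] = m[k]
    · have : k < common ∧ f.getD k ' ' = m.getD k ' ' := by
        refine ⟨hlt, ?_⟩
        rw [List.getD_eq_getElem f ' ' hkf, List.getD_eq_getElem m ' ' hkm, heq]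
      rw [dif_pos this, ih (k+1) (by omega) (by omega)]
      simp [lcpLen, heq]
      omega
    · have hnot : ¬ (k < common ∧ f.getD k ' ' = m.getD k ' ') := by
        rintro ⟨-, hgd⟩
        rw [List.getD_eq_getElem f ' ' hkf, List.getD_eq_getElem m ' ' hkm] at hgd
        exact heq hgd
      rw [dif_neg hnot]
      simp [lcpLen, heq]
      omega

theorem take_prefix_iff_lcp (l : Nat) : ∀ (f m : List Char), l ≤ f.length → l ≤ m.length →
    (f.take l <+: m ↔ l ≤ lcpLen f m) := by
  induction l with
  | zero => simp
  | succ l ih =>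
    intro f m hf hm
    match f, m with
    | a :: as, b :: bs =>
      simp only [List.take_succ_cons, List.cons_prefix_cons, lcpLen]
      by_cases hab : a = b
      · rw [if_pos hab]
        simp only [hab, true_and]
        rw [ih as bs (by simpa using hf) (by simpa using hm)]
        omega
      · simp [hab]

theorem foldl_walk_eq_foldl_min (first : List Char) :
    ∀ (rest : List String) (common : Nat), common ≤ first.length →
    (∀ s ∈ rest, s.toList.length = first.length) →
    rest.foldl (fun c num => pvWalk first num.toList c 0) common
      = rest.foldl (fun c num => min c (lcpLen first num.toList)) common := by
  intro rest
  induction rest with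
  | nil => intro common _ _; rfl
  | cons s t ih =>
    intro common hc hlen
    simp only [List.foldl_cons]
    have hs : s.toList.length = first.length := hlen s (by simp)
    rw [pvWalk_spec first s.toList common hc (by omega) 0 (by omega)]
    simp only [List.drop_zero, Nat.zero_add]
    exact ih _ (by omega) (fun x hx => hlen x (by simp [hx]))

theorem le_foldl_min (l : Nat) : ∀ (xs : List Nat) (a : Nat),
    (l ≤ xs.foldl min a ↔ l ≤ a ∧ ∀ x ∈ xs, l ≤ x) := by
  intro xs
  induction xs with
  | nil => simp
  | cons x t ih =>
    intro a
    simp [List.foldl_cons, ih (min a x)]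
    tauto


theorem find?_congr {α : Type} (xs : List α) (p q : α → Bool) (h : ∀ x ∈ xs, p x = q x) :
    xs.find? p = xs.find? q := by
  induction xs with
  | nil => rfl
  | cons x t ih =>
    simp only [List.find?_cons]
    rw [h x (by simp)]
    cases q x with
    | true => rfl
    | false => exact ih (fun y hy => h y (by simp [hy]))

theorem find?_countdown (T : Nat) : ∀ (c : Int), 0 ≤ c →
    (PySem.List.pyRange c 0 (-1)).find? (fun l => decide (l ≤ (T : Int)))
      = if 1 ≤ min c (T : Int) then some (min c (T : Int)) else none := by
  intro c hc
  induction hn : c.toNat generalizing c with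
  | zero =>
    have hc0 : c = 0 := by omega
    rw [hc0, PySem.List.pyRange_neg_one_eq_nil (by omega)]
    simp
  | succ n ih =>
    have hpos : (0:Int) < c := by omega
    rw [PySem.List.pyRange_neg_one_cons (by omega)]
    by_cases hle : c ≤ (T : Int)
    · have hd : (fun l => decide (l ≤ (T : Int))) c = true := by simpa using hle
      simp only [List.find?_cons, hd]
      rw [if_pos (by omega)]
      congr 1
      omega
    · have hd : (fun l => decide (l ≤ (T : Int))) c = false := by simpa using hle
      simp only [List.find?_cons, hd]
      rw [ih (c - 1) (by omega) (by omega)]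
      by_cases h1 : 1 ≤ min (c - 1) (T : Int)
      · rw [if_pos h1, if_pos (by omega)]
        congr 1
        omega
      · rw [if_neg h1, if_neg (by omega)]

theorem foldl_min_const (n : Int) : ∀ (t : List Int), (∀ y ∈ t, y = n) → t.foldl min n = n := by
  intro t
  induction t with
  | nil => intro; rfl
  | cons x s ih =>
    intro h
    have hx : x = n := h x (by simp)
    simp [List.foldl_cons, hx, ih (fun y hy => h y (by simp [hy]))]

-- ===== VERDICT (by name: the statement is the Claim_ definition above) =====
theorem min_eq_of_const (first : String) (rest : List String) (n : Nat)
    (hn : first.toList.length = n)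
    (hlen : ∀ num ∈ first :: rest, num.toList.length = n) :
    (PySem.List.min? ((first :: rest).map (fun num => (PySem.Str.len num : Int))) (fun x => x)).getD 0
      = (n : Int) := by
  rw [List.map_cons, PySem.List.min?_id_cons]
  simp only [Option.getD_some]
  have hfirst : (PySem.Str.len first : Int) = (n : Int) := by simp [hn]
  rw [hfirst]
  apply foldl_min_const
  intro y hy
  simp only [List.mem_map] at hy
  obtain ⟨num, hnum, rfl⟩ := hy
  simp [hlen num (by simp [hnum])]

theorem find_city_code_length_spec : Claim_equal_find_city_code_length := by
  intro phone_numbers _ hpre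
  unfold Spec_find_city_code_length
  cases phone_numbers with
  | nil => exact absurd rfl hpre
  | cons first rest =>
  set n : Nat := first.toList.length with hn
  by_cases hg : (first :: rest).any
      (fun num => PySem.Str.len num != PySem.Str.len ((first :: rest)[0]?.getD "")) = true
  · -- unequal lengths: both return -1
    unfold find_city_code_length find_city_code_length_alt
    simp only [hg, if_pos]
  · -- all lengths equal
    have hlen : ∀ num ∈ first :: rest, num.toList.length = n := by
      intro num hnum
      simp only [List.any_eq_true, not_exists, not_and] at hg
      have := hg num hnum
      simpa using this
    have hmin := min_eq_of_const first rest n rfl hlen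
    set M : Nat := rest.foldl (fun c num => min c (lcpLen first.toList num.toList)) n with hM
    have hcap : PySem.Int.floordiv (n : Int) 2 = ((n / 2 : Nat) : Int) := by
      rw [PySem.Int.floordiv_eq_ediv_of_pos (by omega)]
      omega
    have hMchar : ∀ l : Nat, l ≤ M ↔ l ≤ n ∧ ∀ num ∈ rest, l ≤ lcpLen first.toList num.toList := by
      intro l
      rw [hM, ← List.foldl_map (f := fun (num : String) => lcpLen first.toList num.toList) (g := min),
        le_foldl_min l _ n]
      constructor
      · rintro ⟨h1, h2⟩
        exact ⟨h1, fun num hnum => h2 _ (List.mem_map_of_mem hnum)⟩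
      · rintro ⟨h1, h2⟩
        refine ⟨h1, fun x hx => ?_⟩
        obtain ⟨num, hnum, rfl⟩ := List.mem_map.mp hx
        exact h2 num hnum
    have hpred : ∀ l ∈ PySem.List.pyRange ((n / 2 : Nat) : Int) 0 (-1),
        ((first :: rest).all
          (fun num => PySem.Str.startswith num
            (PySem.Str.slice ((first :: rest)[0]?.getD "") none (some l))))
          = decide (l ≤ (M : Int)) := by
      intro l hl
      rw [PySem.List.mem_pyRange_neg_one] at hl
      have hl0 : 0 < l := hl.1
      have hlcap : l ≤ ((n / 2 : Nat) : Int) := hl.2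
      have hln : l.toNat ≤ n := by omega
      have heach : ∀ num ∈ first :: rest,
          (PySem.Str.startswith num
            (PySem.Str.slice ((first :: rest)[0]?.getD "") none (some l))) = true
            ↔ l.toNat ≤ lcpLen first.toList num.toList := by
        intro num hnum
        rw [PySem.Str.startswith_eq, PySem.Chars.startswith_iff]
        have hslice : (PySem.Str.slice ((first :: rest)[0]?.getD "") none (some l)).toList
            = first.toList.take l.toNat := by
          simp only [List.getElem?_cons_zero, Option.getD_some]
          rw [PySem.Str.toList_slice, PySem.Chars.slice_eq_listSlice,
            PySem.List.slice_to first.toList (by omega)]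
        rw [hslice]
        exact take_prefix_iff_lcp l.toNat first.toList num.toList (by omega)
          (by rw [hlen num hnum]; omega)
      rw [Bool.eq_iff_iff]
      simp only [decide_eq_true_eq, List.all_eq_true]
      constructor
      · intro hall
        have hM' : l.toNat ≤ M := by
          rw [hMchar]
          refine ⟨hln, fun num hnum => ?_⟩
          exact (heach num (by simp [hnum])).mp (hall num (by simp [hnum]))
        omega
      · intro hlM num hnum
        rw [heach num hnum]
        rcases List.mem_cons.mp hnum with h | h
        · rw [h, lcpLen_self]
          exact hln
        · exact ((hMchar l.toNat).mp (by omega)).2 num h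
    have hgf : ((first :: rest).any
        (fun num => PySem.Str.len num != PySem.Str.len ((first :: rest)[0]?.getD ""))) = false :=
      Bool.eq_false_iff.mpr hg
    unfold find_city_code_length find_city_code_length_alt
    simp only [hmin, hgf, Bool.false_eq_true, if_false, hcap]
    rw [find?_congr _ _ _ hpred, find?_countdown M _ (by omega)]
    simp only [List.getElem?_cons_zero, Option.getD_some, List.drop_succ_cons, List.drop_zero]
    rw [← hn]
    rw [foldl_walk_eq_foldl_min first.toList rest n le_rfl
      (fun x hx => hlen x (by simp [hx]))]
    rw [← hM]
    by_cases hcond : (1:Int) ≤ min ((n / 2 : Nat) : Int) (M : Int)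
    · rw [if_pos hcond]
      simp only []
      rw [if_pos (by omega)]
      omega
    · rw [if_neg hcond]
      simp only []
      rw [if_neg (by omega)]
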